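-- pv_equiv track=rewrite | github.com/Orange-Crush52/classical-crypto | crypto.py | mult_converter
-- ===== SOURCE A (Python) =====
-- az = {
--     0: "a",
--     1: "b",
--     2: "c",
--     3: "d",
--     4: "e",
--     5: "f",
--     6: "g",
--     7: "h",
--     8: "i",
--     9: "j",
--     10: "k",
--     11: "l",
--     12: "m",
--     13: "n",
--     14: "o",
--     15: "p",
--     16: "q",
--     17: "r",
--     18: "s",
--     19: "t",
--     20: "u",
--     21: "v",
--     22: "w",
--     23: "x",
--     24: "y",
--     25: "z",
--     -1: " "
-- }
--
-- abcs = 'abcdefghijklmnopqrstuvwxyz'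
--
-- def mult_converter(string, multiplier):
--     string = string.lower()
--     if int(multiplier) % 2 == 0 or multiplier == 13:
--         return "Please choose a new multiplier. No even numbers or numbers divisible by 13"
--     lst_of_nums = [abcs.find(letter) + 1 for letter in string]
--     new_string = ""
--     for i in lst_of_nums:
--         if i == 0:
--             new_string += " "
--         else:
--             multiplier = multiplier % 26
--             i *= multiplier
--             i = i % 26
--             new_string += az[i]
--     # mult_inverse = mult_modular_inverse[multiplier]
--
--     return new_string  # , mult_inverse
-- ===== SOURCE B (Python) =====
-- def mult_converter(string, multiplier):
--     if int(multiplier) % 2 == 0 or multiplier == 13: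
--         return "Please choose a new multiplier. No even numbers or numbers divisible by 13"
--     abcs = 'abcdefghijklmnopqrstuvwxyz'
--     m = multiplier % 26
--     # cipher alphabet by repetition + strided slicing: no modular arithmetic per letter
--     cipher = (abcs * (m + 1))[m::m][:26]
--     return ''.join(cipher[ord(ch) - 97] if 97 <= ord(ch) <= 122 else ' '
--                    for ch in string.lower())
-- ===== Notes on version B (the rewrite author's own statement) =====
-- stated objective: alternative
-- what changed: B constructs the whole cipher alphabet at once by string repetition and strided slicing ((abcs*(m+1))[m::m][:26]) and then maps each character through it by ord(ch)-97 indexing, instead of A's per-character find/multiply/mod arithmetic with the multiplier variable mutated inside the output loop.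
import Mathlib
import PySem

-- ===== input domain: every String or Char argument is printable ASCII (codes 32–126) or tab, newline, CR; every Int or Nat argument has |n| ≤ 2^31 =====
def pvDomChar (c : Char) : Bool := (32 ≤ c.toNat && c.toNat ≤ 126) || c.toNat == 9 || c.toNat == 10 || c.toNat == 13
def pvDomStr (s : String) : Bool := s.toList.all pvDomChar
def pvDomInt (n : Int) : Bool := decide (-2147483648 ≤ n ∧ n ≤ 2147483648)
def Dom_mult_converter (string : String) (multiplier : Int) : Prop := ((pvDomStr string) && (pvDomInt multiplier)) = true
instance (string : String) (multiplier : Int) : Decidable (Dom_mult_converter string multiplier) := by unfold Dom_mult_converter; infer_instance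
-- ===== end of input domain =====

-- B builds the cipher alphabet by string repetition and strided slicing ((abcs*(m+1))[m::m][:26])
-- and indexes it by ord(ch)-97, with no modular arithmetic per character (objective: alternative).

-- ===== PORT A =====
def pvAbcs : List Char := "abcdefghijklmnopqrstuvwxyz".toList

def pvAz : PySem.Dict Int String := PySem.Dict.ofList
  [(0, "a"), (1, "b"), (2, "c"), (3, "d"), (4, "e"), (5, "f"), (6, "g"), (7, "h"),
   (8, "i"), (9, "j"), (10, "k"), (11, "l"), (12, "m"), (13, "n"), (14, "o"), (15, "p"),
   (16, "q"), (17, "r"), (18, "s"), (19, "t"), (20, "u"), (21, "v"), (22, "w"), (23, "x"),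
   (24, "y"), (25, "z"), (-1, " ")]

def mult_converter (string : String) (multiplier : Int) : String :=
  let s := PySem.Chars.lower string.toList
  if PySem.Int.mod multiplier 2 == 0 || multiplier == 13 then
    "Please choose a new multiplier. No even numbers or numbers divisible by 13"
  else
    let lst_of_nums : List Int := s.map (fun letter => PySem.Chars.find pvAbcs [letter] + 1)
    -- the loop reassigns `multiplier`, so the fold state is (multiplier, new_string as a char list)
    let r := lst_of_nums.foldl
      (fun (st : Int × List Char) i =>
        if i == 0 then (st.1, st.2 ++ [' '])
        else
          let m := PySem.Int.mod st.1 26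
          let j := PySem.Int.mod (i * m) 26
          (m, st.2 ++ ((pvAz.get? j).getD "").toList))  -- the key j is always present in az
      (multiplier, [])
    String.ofList r.2

-- ===== PORT B =====
-- Source B's cipher = (abcs * (m + 1))[m::m][:26]; the slice step m is never 0 on the else branch
-- (multiplier is odd there, so m = multiplier % 26 is odd), so getD [] is unreachable
def pvCipher (m : Int) : List Char :=
  PySem.List.slice
    ((PySem.List.slice? ((List.replicate (m + 1).toNat pvAbcs).flatten) (some m) none m).getD [])
    none (some 26)

def mult_converter_alt (string : String) (multiplier : Int) : String :=
  if PySem.Int.mod multiplier 2 == 0 || multiplier == 13 then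
    "Please choose a new multiplier. No even numbers or numbers divisible by 13"
  else
    let m := PySem.Int.mod multiplier 26
    let cipher := pvCipher m
    String.ofList ((PySem.Chars.lower string.toList).map
      (fun ch =>
        if 97 ≤ ch.toNat ∧ ch.toNat ≤ 122 then
          PySem.List.pyGetD cipher ((ch.toNat : Int) - 97) ' '
        else ' '))

-- ===== PRECONDITION & SPEC =====
def Spec_mult_converter (string : String) (multiplier : Int) (out : String) : Prop := out = mult_converter_alt string multiplier
instance (string : String) (multiplier : Int) (out : String) : Decidable (Spec_mult_converter string multiplier out) := by unfold Spec_mult_converter; infer_instance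

-- ===== CLAIM (what is proved, stated in full; the proofs are below) =====
def Claim_equal_mult_converter : Prop := ∀ (string : String) (multiplier : Int), Dom_mult_converter string multiplier → Spec_mult_converter string multiplier (mult_converter string multiplier)

-- ===== LEMMAS AND PROOFS =====

-- the sliced cipher alphabet agrees with the arithmetic table, letter by letter (finitely many m)
set_option maxRecDepth 8192 in
theorem pvCipherSpec (m : Int) (h1 : 1 ≤ m) (h26 : m < 26) :
    ∀ k : Nat, k < 26 →
      PySem.List.pyGetD (pvCipher m) (k : Int) ' ' =
        (PySem.Chars.pyGet? pvAbcs (PySem.Int.mod (((k : Int) + 1) * m) 26)).getD ' ' := by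
  interval_cases m <;> decide

theorem pvOrdAll : ∀ k : Nat, k < 26 → (pvAbcs.getD k ' ').toNat = 97 + k := by decide

theorem pvFindAll : ∀ k : Nat, k < 26 → PySem.Chars.find pvAbcs [pvAbcs.getD k ' '] = k := by decide

theorem pvMemOfRange (c : Char) (h : 97 ≤ c.toNat ∧ c.toNat ≤ 122) : c ∈ pvAbcs := by
  obtain ⟨h1, h2⟩ := h
  have hc : Char.ofNat c.toNat = c := Char.ofNat_toNat c
  rw [← hc]
  interval_cases h : c.toNat <;> decide

-- az looked up at j ∈ [0,26) is the single letter abcs[j]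
theorem pvAz_eq_abcs (j : Int) (h0 : 0 ≤ j) (h1 : j < 26) :
    ((pvAz.get? j).getD "").toList = [(PySem.Chars.pyGet? pvAbcs j).getD ' '] := by
  interval_cases j <;> decide

-- per-character agreement: A's find/az arithmetic equals B's ord-indexed cipher lookup
theorem pvPerChar (m' : Int) (h1 : 1 ≤ m') (h26 : m' < 26) (c : Char) :
    (if (PySem.Chars.find pvAbcs [c] + 1) == 0 then [' ']
     else ((pvAz.get? (PySem.Int.mod ((PySem.Chars.find pvAbcs [c] + 1) * m') 26)).getD "").toList)
    = [if 97 ≤ c.toNat ∧ c.toNat ≤ 122 then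
         PySem.List.pyGetD (pvCipher m') ((c.toNat : Int) - 97) ' ' else ' '] := by
  by_cases hc : c ∈ pvAbcs
  · obtain ⟨k, hk, hck⟩ := List.mem_iff_getElem.mp hc
    have hk26 : k < 26 := by
      have : pvAbcs.length = 26 := by decide
      omega
    have hcd : pvAbcs.getD k ' ' = c := by
      rw [List.getD_eq_getElem?_getD, List.getElem?_eq_getElem hk]; exact hck
    have hf := pvFindAll k hk26
    have ho := pvOrdAll k hk26
    rw [← hcd, hf, ho]
    rw [if_neg (by simp; omega), if_pos (by omega)]
    have harg : ((97 + k : Nat) : Int) - 97 = (k : Int) := by push_cast; ring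
    rw [harg, pvCipherSpec m' h1 h26 k hk26]
    rw [pvAz_eq_abcs _ (PySem.Int.mod_nonneg _ (by norm_num)) (PySem.Int.mod_lt _ (by norm_num))]
  · have hf : PySem.Chars.find pvAbcs [c] = -1 :=
      (PySem.Chars.find_eq_neg_one_iff _ _).mpr (fun h => hc ((List.singleton_infix_iff c _).mp h))
    rw [hf, if_pos (by norm_num), if_neg (fun h => hc (pvMemOfRange c h))]

-- the result in [0,26) is a fixed point of mod 26
theorem pvMod26_fix (m' : Int) (h0 : 0 ≤ m') (h1 : m' < 26) : PySem.Int.mod m' 26 = m' := by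
  rw [PySem.Int.mod_eq_emod_of_pos (by norm_num : (0:Int) < 26)]
  exact Int.emod_eq_of_lt h0 h1

-- A's loop (with its mutated multiplier as fold state) produces exactly B's mapped lookups
theorem pvLoop (m' : Int) (h1 : 1 ≤ m') (h26 : m' < 26) :
    ∀ (cs : List Char) (mult : Int) (acc : List Char), PySem.Int.mod mult 26 = m' →
    ((cs.map (fun letter => PySem.Chars.find pvAbcs [letter] + 1)).foldl
      (fun (st : Int × List Char) i =>
        if i == 0 then (st.1, st.2 ++ [' '])
        else
          let m := PySem.Int.mod st.1 26
          let j := PySem.Int.mod (i * m) 26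
          (m, st.2 ++ ((pvAz.get? j).getD "").toList))
      (mult, acc)).2
    = acc ++ cs.map (fun ch =>
        if 97 ≤ ch.toNat ∧ ch.toNat ≤ 122 then
          PySem.List.pyGetD (pvCipher m') ((ch.toNat : Int) - 97) ' ' else ' ') := by
  intro cs
  induction cs with
  | nil => intro mult acc h; simp
  | cons c cs ih =>
    intro mult acc h
    have hpc := pvPerChar m' h1 h26 c
    simp only [List.map_cons, List.foldl_cons]
    by_cases hi : (PySem.Chars.find pvAbcs [c] + 1) == 0
    · rw [if_pos hi] at hpc ⊢
      rw [ih mult _ h, List.append_assoc, hpc]; rfl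
    · rw [if_neg (by simpa using hi)] at hpc ⊢
      simp only [h]
      rw [ih m' _ (pvMod26_fix m' (by omega) h26), List.append_assoc, hpc]; rfl

-- on the else branch the multiplier is odd, so m = multiplier % 26 is odd, hence 1 ≤ m
theorem pvModPos (mult : Int) (hodd : PySem.Int.mod mult 2 ≠ 0) :
    1 ≤ PySem.Int.mod mult 26 := by
  have h0 := PySem.Int.mod_nonneg mult (by norm_num : (0:Int) < 26)
  rcases eq_or_lt_of_le h0 with h | h
  · exfalso
    have h26 : (26:Int) ∣ mult := (PySem.Int.mod_eq_zero_iff_dvd mult 26).mp h.symm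
    exact hodd ((PySem.Int.mod_eq_zero_iff_dvd mult 2).mpr (dvd_trans (by norm_num) h26))
  · omega

-- ===== VERDICT (by name: the statement is the Claim_ definition above) =====
theorem mult_converter_spec : Claim_equal_mult_converter := by
  intro s m _
  unfold Spec_mult_converter mult_converter mult_converter_alt
  by_cases hg : (PySem.Int.mod m 2 == 0 || m == 13) = true
  · rw [if_pos hg, if_pos hg]
  · rw [if_neg hg, if_neg hg]
    have hodd : PySem.Int.mod m 2 ≠ 0 := by
      intro h; exact hg (by rw [h]; simp)
    have h1 : (1:Int) ≤ PySem.Int.mod m 26 := pvModPos m hodd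
    have h26 : PySem.Int.mod m 26 < 26 := PySem.Int.mod_lt m (by norm_num)
    have := pvLoop (PySem.Int.mod m 26) h1 h26 (PySem.Chars.lower s.toList) m [] rfl
    simp only [List.nil_append] at this
    exact congrArg String.ofList this
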